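-- pv_equiv track=rewrite | github.com/nowakowski-m/JSP2022 | Kolokwium 1/zad5.py | SingleWord
-- ===== SOURCE A (Python) =====
-- samo = ['a', 'e', 'i', 'o', 'u', 'A', 'E', 'I', 'O', 'U']
--
-- def SingleWord(single:str) -> str:
--
--     pkt = 0
--     amountOfSamo = 0
--
--     for ele in range (len(single)):
--
--         if single[ele] in samo:
--             amountOfSamo += 1
--             if amountOfSamo % 2 == 0:
--                 pkt = 2
--             else:
--                 pkt = 1
--
--     return pkt
-- ===== SOURCE B (Python) =====
-- samo = ['a', 'e', 'i', 'o', 'u', 'A', 'E', 'I', 'O', 'U']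
--
-- def SingleWord(single: str) -> int:
--     # Divide and conquer: combine (any_vowel, odd_vowel_count) over halves
--     # with the monoid (or, xor), then classify the pair.
--     def go(s):
--         n = len(s)
--         if n == 0:
--             return (False, False)
--         if n == 1:
--             v = s in samo
--             return (v, v)
--         k = n // 2
--         s1, o1 = go(s[:k])
--         s2, o2 = go(s[k:])
--         return (s1 or s2, o1 != o2)
--     seen, odd = go(single)
--     if not seen:
--         return 0
--     return 1 if odd else 2
-- ===== Notes on version B (the rewrite author's own statement) =====
-- stated objective: alternative
-- what changed: B replaces A's left-to-right indexed loop that reassigns the score on every vowel with a divide-and-conquer recursion: it splits the string in halves, combines (any-vowel, odd-parity) pairs with the (or, xor) monoid, and classifies the final pair.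
import Mathlib
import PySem

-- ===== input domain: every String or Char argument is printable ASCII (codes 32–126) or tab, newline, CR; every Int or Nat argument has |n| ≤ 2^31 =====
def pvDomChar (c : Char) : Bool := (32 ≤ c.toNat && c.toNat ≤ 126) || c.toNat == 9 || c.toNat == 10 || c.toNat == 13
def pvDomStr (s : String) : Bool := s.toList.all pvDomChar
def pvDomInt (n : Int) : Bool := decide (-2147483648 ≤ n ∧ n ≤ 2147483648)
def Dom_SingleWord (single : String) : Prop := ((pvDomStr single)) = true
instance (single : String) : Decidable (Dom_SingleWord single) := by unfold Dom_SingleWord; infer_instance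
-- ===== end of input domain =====

-- B replaces A's indexed loop by a divide-and-conquer recursion combining (any-vowel, odd-parity) with (or, xor); alternative structure, not faster.
-- ===== PORT A =====
def samo : List Char := ['a', 'e', 'i', 'o', 'u', 'A', 'E', 'I', 'O', 'U']

-- loop body of A: updates (pkt, amountOfSamo) exactly as the Python loop iteration does
def pvStepA (st : Int × Int) (ele : Char) : Int × Int :=
  if ele ∈ samo then
    let amountOfSamo := st.2 + 1
    if amountOfSamo % 2 == 0 then (2, amountOfSamo) else (1, amountOfSamo)
  else st

def SingleWord (single : String) : Int :=
  (single.toList.foldl pvStepA (0, 0)).1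

-- ===== PORT B =====
-- go of Source B: splits in halves, combines (seen, odd) with (or, xor)
def pvGo : List Char → Bool × Bool
  | [] => (false, false)
  | [c] => (decide (c ∈ samo), decide (c ∈ samo))
  | c1 :: c2 :: rest =>
    let k := (c1 :: c2 :: rest).length / 2
    let p := pvGo ((c1 :: c2 :: rest).take k)
    let q := pvGo ((c1 :: c2 :: rest).drop k)
    (p.1 || q.1, p.2 != q.2)
termination_by l => l.length
decreasing_by
  · simp; omega
  · simp; omega

def SingleWord_alt (single : String) : Int :=
  let r := pvGo single.toList
  if !r.1 then 0 else if r.2 then 1 else 2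

-- ===== PRECONDITION & SPEC =====
def Spec_SingleWord (single : String) (out : Int) : Prop := out = SingleWord_alt single
instance (single : String) (out : Int) : Decidable (Spec_SingleWord single out) := by unfold Spec_SingleWord; infer_instance

-- ===== CLAIM (what is proved, stated in full; the proofs are below) =====
def Claim_equal_SingleWord : Prop := ∀ (single : String), Dom_SingleWord single → Spec_SingleWord single (SingleWord single)

-- ===== LEMMAS AND PROOFS =====
def pvCount (l : List Char) : Nat := l.countP (fun c => decide (c ∈ samo))

theorem pvGo_spec : ∀ (n : Nat) (l : List Char), l.length ≤ n →
    pvGo l = (l.any (fun c => decide (c ∈ samo)), decide (pvCount l % 2 = 1)) := by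
  intro n
  induction n with
  | zero =>
    intro l hl
    have : l = [] := List.length_eq_zero_iff.mp (by omega)
    simp [this, pvGo, pvCount]
  | succ n ih =>
    intro l hl
    match l with
    | [] => simp [pvGo, pvCount]
    | [c] => by_cases hc : c ∈ samo <;> simp [pvGo, pvCount, hc]
    | c1 :: c2 :: rest =>
      rw [pvGo]
      set L := c1 :: c2 :: rest with hL
      set k := L.length / 2 with hk
      have hlen : L.length = rest.length + 2 := by simp [hL]
      have h1 : (L.take k).length ≤ n := by simp only [List.length_take]; omega
      have h2 : (L.drop k).length ≤ n := by simp only [List.length_drop]; omega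
      rw [ih _ h1, ih _ h2]
      have hsplit : L.take k ++ L.drop k = L := List.take_append_drop k L
      have hcount : pvCount (L.take k) + pvCount (L.drop k) = pvCount L := by
        unfold pvCount
        conv_rhs => rw [← hsplit]
        rw [List.countP_append]
      have hany : (((L.take k).any fun c => decide (c ∈ samo)) || ((L.drop k).any fun c => decide (c ∈ samo))) = (L.any fun c => decide (c ∈ samo)) := by
        conv_rhs => rw [← hsplit]
        rw [List.any_append]
      simp only [Prod.mk.injEq]
      refine ⟨hany, ?_⟩
      by_cases ha : pvCount (L.take k) % 2 = 1 <;> by_cases hb : pvCount (L.drop k) % 2 = 1 <;>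
        simp [ha, hb] <;> omega

def pvClassify (a : Int) : Int := if a == 0 then 0 else if a % 2 == 1 then 1 else 2

theorem pv_fold_inv (l : List Char) : ∀ (a : Int), 0 ≤ a →
    l.foldl pvStepA (pvClassify a, a)
    = (pvClassify (a + pvCount l), a + pvCount l) := by
  induction l with
  | nil => intro a _; simp [pvCount]
  | cons c l ih =>
    intro a ha
    by_cases hc : c ∈ samo
    · have hstep : pvStepA (pvClassify a, a) c = (pvClassify (a + 1), a + 1) := by
        unfold pvStepA pvClassify
        have : (a+1) % 2 = 0 ∨ (a+1) % 2 = 1 := by omega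
        rcases this with h | h <;> simp [hc, h] <;> omega
      rw [List.foldl_cons, hstep, ih (a+1) (by omega)]
      have hcnt : pvCount (c :: l) = pvCount l + 1 := by
        unfold pvCount; simp [hc]
      have harg : a + 1 + (pvCount l : Int) = a + ((pvCount l + 1 : Nat) : Int) := by
        push_cast; ring
      rw [hcnt, ← harg]
    · have hcnt : pvCount (c :: l) = pvCount l := by
        unfold pvCount; simp [hc]
      rw [List.foldl_cons,
          show pvStepA (pvClassify a, a) c = (pvClassify a, a) by simp [pvStepA, hc],
          ih a ha, hcnt]

-- ===== VERDICT (by name: the statement is the Claim_ definition above) =====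
theorem SingleWord_spec : Claim_equal_SingleWord := by
  intro single _
  unfold Spec_SingleWord SingleWord SingleWord_alt
  have hA := pv_fold_inv single.toList 0 (le_refl 0)
  rw [show ((0 : Int), (0 : Int)) = (pvClassify 0, 0) from by decide]
  rw [hA]
  rw [pvGo_spec single.toList.length single.toList (le_refl _)]
  simp only [zero_add]
  set m := pvCount single.toList with hm
  have h : (single.toList.any fun c => decide (c ∈ samo)) = true ↔ 0 < m := by
    rw [List.any_eq_true]; rw [hm]; unfold pvCount; rw [List.countP_pos_iff]
  unfold pvClassify
  by_cases h0 : m = 0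
  · have hf : (single.toList.any fun c => decide (c ∈ samo)) = false := by
      rw [← Bool.not_eq_true, h]; omega
    simp [hf, h0]
  · have ht : (single.toList.any fun c => decide (c ∈ samo)) = true := h.mpr (by omega)
    have hne : ((m : Int) == 0) = false := by simp; omega
    by_cases hp : m % 2 = 1
    · have hq : ((m : Int) % 2 == 1) = true := by simp; omega
      simp [ht, hne, hp, hq]
    · have hq : ((m : Int) % 2 == 1) = false := by simp; omega
      simp [ht, hne, hp, hq]
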